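-- pv_equiv track=rewrite | github.com/weigangq/ag-randmax | MattD/LatticeUniform.py | lattice
-- ===== SOURCE A (Python) =====
-- def lattice(n,m):  #n = defualt img size
--         x=[]
--         y=[]
--         for i in range(n):
--             for j in range(m):
--                 x.append(i)
--                 y.append(j)
--         return x,y
-- ===== SOURCE B (Python) =====
-- def lattice(n, m):
--     # Flatten the grid: cell k of the n*m grid has row k // m and column k % m.
--     if n <= 0 or m <= 0:
--         return [], []
--     x = []
--     y = []
--     for k in range(n * m):
--         q, r = divmod(k, m)
--         x.append(q)
--         y.append(r)
--     return x, y
-- ===== Notes on version B (the rewrite author's own statement) =====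
-- stated objective: alternative
-- what changed: Replaces the nested row/column loop with a single flat loop over the n*m cell indices, recovering each coordinate pair arithmetically as divmod(k, m).
import Mathlib
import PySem

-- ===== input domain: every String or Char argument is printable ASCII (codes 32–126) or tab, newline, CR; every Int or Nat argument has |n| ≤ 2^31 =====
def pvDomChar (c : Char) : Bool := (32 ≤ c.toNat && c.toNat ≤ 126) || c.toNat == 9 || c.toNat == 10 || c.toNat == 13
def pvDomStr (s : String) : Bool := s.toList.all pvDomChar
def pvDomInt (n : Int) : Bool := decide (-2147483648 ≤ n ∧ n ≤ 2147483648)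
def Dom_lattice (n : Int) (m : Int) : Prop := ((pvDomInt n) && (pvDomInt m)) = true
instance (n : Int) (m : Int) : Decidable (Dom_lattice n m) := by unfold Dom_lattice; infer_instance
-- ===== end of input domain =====

-- B replaces A's nested row/column loop by one flat loop over the n*m cell indices, computing each coordinate as divmod(k, m); objective: alternative decomposition.


-- ===== PORT A =====
-- for i in range(n): for j in range(m): x.append(i); y.append(j)
def lattice (n : Int) (m : Int) : List Int × List Int :=
  (PySem.List.pyRange 0 n 1).foldl
    (fun (xy : List Int × List Int) i =>
      (PySem.List.pyRange 0 m 1).foldl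
        (fun (xy : List Int × List Int) j => (xy.1 ++ [i], xy.2 ++ [j])) xy)
    ([], [])

-- ===== PORT B =====
-- if n <= 0 or m <= 0: return [], []
-- for k in range(n*m): q, r = divmod(k, m); x.append(q); y.append(r)
def lattice_alt (n : Int) (m : Int) : List Int × List Int :=
  if n ≤ 0 ∨ m ≤ 0 then ([], [])
  else
    (PySem.List.pyRange 0 (n * m) 1).foldl
      (fun (xy : List Int × List Int) k =>
        (xy.1 ++ [PySem.Int.floordiv k m], xy.2 ++ [PySem.Int.mod k m]))
      ([], [])

-- ===== PRECONDITION & SPEC =====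
def Spec_lattice (n : Int) (m : Int) (out : List Int × List Int) : Prop := out = lattice_alt n m
instance (n : Int) (m : Int) (out : List Int × List Int) : Decidable (Spec_lattice n m out) := by unfold Spec_lattice; infer_instance

-- ===== CLAIM (what is proved, stated in full; the proofs are below) =====
def Claim_equal_lattice : Prop := ∀ (n : Int) (m : Int), Dom_lattice n m → Spec_lattice n m (lattice n m)

-- ===== LEMMAS AND PROOFS =====

-- A's inner row loop: appends i to x m times and the j's to y
theorem lattice_inner (R : List Int) (i : Int) (a b : List Int) :
    R.foldl (fun (xy : List Int × List Int) j => (xy.1 ++ [i], xy.2 ++ [j])) (a, b)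
      = (a ++ R.map (fun _ => i), b ++ R) := by
  induction R generalizing a b with
  | nil => simp
  | cons r rs ih => simp [List.foldl, ih]

-- A's outer loop over any index list l
theorem lattice_outer (l R : List Int) (a b : List Int) :
    l.foldl (fun (xy : List Int × List Int) i =>
        R.foldl (fun (xy : List Int × List Int) j => (xy.1 ++ [i], xy.2 ++ [j])) xy) (a, b)
      = (a ++ l.flatMap (fun i => R.map (fun _ => i)),
         b ++ l.flatMap (fun _ => R)) := by
  induction l generalizing a b with
  | nil => simp
  | cons h t ih => simp [List.foldl, lattice_inner, ih]

-- B's flat loop is a pair of maps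
theorem lattice_flat (l : List Int) (f g : Int → Int) (a b : List Int) :
    l.foldl (fun (xy : List Int × List Int) k => (xy.1 ++ [f k], xy.2 ++ [g k])) (a, b)
      = (a ++ l.map f, b ++ l.map g) := by
  induction l generalizing a b with
  | nil => simp
  | cons h t ih => simp [List.foldl, ih]

-- Nat-level: dividing the flat index by M recovers the row indices
theorem flat_div (N M : Nat) (hM : 0 < M) :
    (List.range (N * M)).map (fun k => k / M)
      = (List.range N).flatMap (fun i => (List.range M).map (fun _ => i)) := by
  induction N with
  | zero => simp
  | succ N ih =>
      rw [Nat.succ_mul, List.range_add, List.map_append, ih, List.range_succ,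
        List.flatMap_append]
      congr 1
      simp only [List.flatMap_cons, List.flatMap_nil, List.append_nil, List.map_map]
      refine List.map_congr_left (fun j hj => ?_)
      simp only [List.mem_range] at hj
      simp only [Function.comp_def]
      rw [Nat.add_comm, Nat.mul_comm, Nat.add_mul_div_left _ _ hM, Nat.div_eq_of_lt hj,
        Nat.zero_add]

-- Nat-level: the remainder mod M recovers the column indices
theorem flat_mod (N M : Nat) :
    (List.range (N * M)).map (fun k => k % M)
      = (List.range N).flatMap (fun _ => List.range M) := by
  induction N with
  | zero => simp
  | succ N ih =>
      rw [Nat.succ_mul, List.range_add, List.map_append, ih, List.range_succ,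
        List.flatMap_append]
      congr 1
      simp only [List.flatMap_cons, List.flatMap_nil, List.append_nil, List.map_map]
      refine (List.map_congr_left (fun j hj => ?_)).trans (List.map_id _)
      simp only [List.mem_range] at hj
      simp only [Function.comp_def, id]
      rw [Nat.add_comm, Nat.add_mul_mod_self_right, Nat.mod_eq_of_lt hj]

-- ===== VERDICT (by name: the statement is the Claim_ definition above) =====
theorem lattice_spec : Claim_equal_lattice := by
  intro n m _
  unfold Spec_lattice lattice lattice_alt
  rw [lattice_outer]
  by_cases h : n ≤ 0 ∨ m ≤ 0
  · rw [if_pos h]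
    rcases h with h | h
    · simp [PySem.List.pyRange_one_eq_nil h]
    · simp [PySem.List.pyRange_one_eq_nil h]
  · rw [if_neg h, lattice_flat]
    push Not at h
    obtain ⟨hn, hm⟩ := h
    obtain ⟨N, rfl⟩ : ∃ N : Nat, n = (N : Int) := ⟨n.toNat, (Int.toNat_of_nonneg hn.le).symm⟩
    obtain ⟨M, rfl⟩ : ∃ M : Nat, m = (M : Int) := ⟨m.toNat, (Int.toNat_of_nonneg hm.le).symm⟩
    have hM : 0 < M := by exact_mod_cast hm
    rw [PySem.List.pyRange_one 0 ((N : Int) * M), PySem.List.pyRange_one 0 (N : Int),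
      PySem.List.pyRange_one 0 (M : Int)]
    simp only [sub_zero, zero_add, Int.toNat_natCast, List.map_map,
      ← Int.natCast_mul, Function.comp_def]
    simp only [PySem.Int.floordiv_natCast, PySem.Int.mod_natCast]
    congr 1
    · rw [List.nil_append, List.nil_append, List.flatMap_map,
        show (fun x : Nat => ((x / M : Nat) : Int)) =
          (fun i : Nat => (i : Int)) ∘ (fun k => k / M) from rfl,
        ← List.map_map, flat_div N M hM, List.map_flatMap]
      simp
    · rw [List.nil_append, List.nil_append, List.flatMap_map,
        show (fun x : Nat => ((x % M : Nat) : Int)) =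
          (fun i : Nat => (i : Int)) ∘ (fun k => k % M) from rfl,
        ← List.map_map, flat_mod N M, List.map_flatMap]
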